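-- pv_equiv track=rewrite | github.com/svjack/PhotoWCT | WCT/utils.py | swap_filter_fit
-- ===== SOURCE A (Python) =====
-- def swap_filter_fit(H, W, patch_size, stride, n_pools=4):
--     '''Style swap may not output same size encoding if filter size > 1, calculate a new size to avoid this'''
--     # Calculate size of encodings after max pooling n_pools times
--     pool_out_size = lambda x: (x + 2 - 1) // 2
--     H_pool_out, W_pool_out = H, W
--     for _ in range(n_pools):
--         H_pool_out, W_pool_out = pool_out_size(H_pool_out), pool_out_size(W_pool_out)
--
--     # Size of encoding after applying conv to determine nearest neighbor patches
--     H_conv_out = (H_pool_out - patch_size) // stride + 1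
--     W_conv_out = (W_pool_out - patch_size) // stride + 1
--
--     # Size after transposed conv
--     H_deconv_out = (H_conv_out - 1) * stride + patch_size
--     W_deconv_out = (W_conv_out - 1) * stride + patch_size
--
--     # Stylized output size after decoding
--     H_out = H_deconv_out * 2**n_pools
--     W_out = W_deconv_out * 2**n_pools
--
--     # Image will need to be resized/cropped if pooled encoding does not match style-swap encoding in either dim
--     should_refit = (H_pool_out != H_deconv_out) or (W_pool_out != W_deconv_out)
--
--     return should_refit, H_out, W_out
-- ===== SOURCE B (Python) =====
-- def swap_filter_fit(H, W, patch_size, stride, n_pools=4):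
--     '''Closed-form: n_pools halvings of x equal ceil(x / 2**n_pools).'''
--     p = 2 ** n_pools
--     H_pool_out = -(-H // p)
--     W_pool_out = -(-W // p)
--     H_deconv_out = ((H_pool_out - patch_size) // stride) * stride + patch_size
--     W_deconv_out = ((W_pool_out - patch_size) // stride) * stride + patch_size
--     should_refit = (H_pool_out != H_deconv_out) or (W_pool_out != W_deconv_out)
--     return should_refit, H_deconv_out * p, W_deconv_out * p
-- ===== Notes on version B (the rewrite author's own statement) =====
-- stated objective: simpler
-- what changed: Replaced the n_pools-iteration halving loop by a single closed-form ceiling division by 2**n_pools (repeated (x+1)//2 equals ceil(x/2**n)), and folded the conv/deconv +1/-1 pair into one expression.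
-- outside the precondition, e.g. on swap_filter_fit(64, 64, 3, 0, 4): A raises ZeroDivisionError, B raises ZeroDivisionError; on swap_filter_fit(64, 64, 3, 1, -1): A returns (False, 32.0, 32.0), B returns (False, 64.0, 64.0)
import Mathlib
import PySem

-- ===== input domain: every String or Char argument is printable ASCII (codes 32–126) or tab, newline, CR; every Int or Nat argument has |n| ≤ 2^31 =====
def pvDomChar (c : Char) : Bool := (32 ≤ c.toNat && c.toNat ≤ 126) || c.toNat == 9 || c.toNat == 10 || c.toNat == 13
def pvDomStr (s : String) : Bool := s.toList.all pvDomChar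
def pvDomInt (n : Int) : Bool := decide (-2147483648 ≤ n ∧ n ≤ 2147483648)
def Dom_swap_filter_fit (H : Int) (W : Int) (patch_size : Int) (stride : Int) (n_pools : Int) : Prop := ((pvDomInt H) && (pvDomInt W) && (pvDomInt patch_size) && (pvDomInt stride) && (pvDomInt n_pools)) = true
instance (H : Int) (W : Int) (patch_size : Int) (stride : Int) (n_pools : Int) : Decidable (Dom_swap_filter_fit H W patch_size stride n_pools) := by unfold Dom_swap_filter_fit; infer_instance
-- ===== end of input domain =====

-- B replaces A's n_pools-iteration halving loop by one closed-form ceiling division by 2**n_pools (objective: simpler).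

-- ===== PORT A =====
def swap_filter_fit (H : Int) (W : Int) (patch_size : Int) (stride : Int) (n_pools : Int) : Bool × Int × Int :=
  let pool_out_size : Int → Int := fun x => PySem.Int.floordiv (x + 2 - 1) 2
  let hw := (PySem.List.pyRange 0 n_pools 1).foldl
      (fun (p : Int × Int) _ => (pool_out_size p.1, pool_out_size p.2)) (H, W)
  let H_pool_out := hw.1
  let W_pool_out := hw.2
  let H_conv_out := PySem.Int.floordiv (H_pool_out - patch_size) stride + 1
  let W_conv_out := PySem.Int.floordiv (W_pool_out - patch_size) stride + 1
  let H_deconv_out := (H_conv_out - 1) * stride + patch_size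
  let W_deconv_out := (W_conv_out - 1) * stride + patch_size
  let H_out := H_deconv_out * 2 ^ n_pools.toNat
  let W_out := W_deconv_out * 2 ^ n_pools.toNat
  let should_refit := (H_pool_out != H_deconv_out) || (W_pool_out != W_deconv_out)
  (should_refit, H_out, W_out)

-- ===== PORT B =====
def swap_filter_fit_alt (H : Int) (W : Int) (patch_size : Int) (stride : Int) (n_pools : Int) : Bool × Int × Int :=
  let p : Int := 2 ^ n_pools.toNat
  let H_pool_out := -(PySem.Int.floordiv (-H) p)
  let W_pool_out := -(PySem.Int.floordiv (-W) p)
  let H_deconv_out := (PySem.Int.floordiv (H_pool_out - patch_size) stride) * stride + patch_size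
  let W_deconv_out := (PySem.Int.floordiv (W_pool_out - patch_size) stride) * stride + patch_size
  let should_refit := (H_pool_out != H_deconv_out) || (W_pool_out != W_deconv_out)
  (should_refit, H_deconv_out * p, W_deconv_out * p)

-- ===== PRECONDITION & SPEC =====
-- Pre_ excludes stride = 0 (A raises ZeroDivisionError) and n_pools < 0 (Python 2**n_pools is then a float, so A's result leaves the declared Int type).
def Pre_swap_filter_fit (H : Int) (W : Int) (patch_size : Int) (stride : Int) (n_pools : Int) : Prop :=
  stride ≠ 0 ∧ 0 ≤ n_pools
instance (H : Int) (W : Int) (patch_size : Int) (stride : Int) (n_pools : Int) : Decidable (Pre_swap_filter_fit H W patch_size stride n_pools) := by unfold Pre_swap_filter_fit; infer_instance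

def pvWitness_swap_filter_fit : Int × Int × Int × Int × Int := (256, 256, 3, 1, 4)

def Spec_swap_filter_fit (H : Int) (W : Int) (patch_size : Int) (stride : Int) (n_pools : Int) (out : Bool × Int × Int) : Prop := out = swap_filter_fit_alt H W patch_size stride n_pools
instance (H : Int) (W : Int) (patch_size : Int) (stride : Int) (n_pools : Int) (out : Bool × Int × Int) : Decidable (Spec_swap_filter_fit H W patch_size stride n_pools out) := by unfold Spec_swap_filter_fit; infer_instance

-- ===== CLAIM (what is proved, stated in full; the proofs are below) =====
def Claim_equal_swap_filter_fit : Prop := ∀ (H : Int) (W : Int) (patch_size : Int) (stride : Int) (n_pools : Int), Dom_swap_filter_fit H W patch_size stride n_pools → Pre_swap_filter_fit H W patch_size stride n_pools → Spec_swap_filter_fit H W patch_size stride n_pools (swap_filter_fit H W patch_size stride n_pools)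

-- ===== LEMMAS AND PROOFS =====

-- (x + 2 - 1) // 2 = ceil(x/2) = -((-x) // 2)
lemma pool_eq_ceil (x : Int) :
    PySem.Int.floordiv (x + 2 - 1) 2 = -(PySem.Int.floordiv (-x) 2) := by
  rw [PySem.Int.floordiv_eq_iff_of_pos (by norm_num)]
  have h := (PySem.Int.neg_floordiv_neg_eq_iff_of_pos (a := x) (b := 2)
      (q := -(PySem.Int.floordiv (-x) 2)) (by norm_num)).mpr
  rcases (PySem.Int.neg_floordiv_neg_eq_iff_of_pos (a := x) (b := 2)
      (q := -(PySem.Int.floordiv (-x) 2)) (by norm_num)).mp rfl with ⟨h1, h2⟩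
  constructor <;> omega

-- applying ceil(·/2) then ceil(·/2^n) equals ceil(·/2^(n+1))
lemma ceil_ceil (n : ℕ) (x : Int) :
    -(PySem.Int.floordiv (-(-(PySem.Int.floordiv (-x) 2))) (2 ^ n)) =
      -(PySem.Int.floordiv (-x) (2 ^ (n + 1))) := by
  have hp : (0 : Int) < 2 ^ n := by positivity
  set c : Int := -(PySem.Int.floordiv (-x) 2) with hc
  rcases (PySem.Int.neg_floordiv_neg_eq_iff_of_pos (a := x) (b := 2) (q := c)
      (by norm_num)).mp rfl with ⟨hc1, hc2⟩
  set q : Int := -(PySem.Int.floordiv (-c) (2 ^ n)) with hq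
  rcases (PySem.Int.neg_floordiv_neg_eq_iff_of_pos (a := c) (b := 2 ^ n) (q := q)
      hp).mp rfl with ⟨hq1, hq2⟩
  rw [eq_comm]
  refine (PySem.Int.neg_floordiv_neg_eq_iff_of_pos (a := x) (b := 2 ^ (n + 1)) (q := q)
      (by positivity)).mpr ⟨?_, ?_⟩
  · have h1 : (q - 1) * 2 ^ n ≤ c - 1 := by nlinarith
    calc (q - 1) * 2 ^ (n + 1) = ((q - 1) * 2 ^ n) * 2 := by ring
      _ ≤ (c - 1) * 2 := by nlinarith
      _ < x := by omega
  · calc x ≤ c * 2 := by omega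
      _ ≤ (q * 2 ^ n) * 2 := by nlinarith
      _ = q * 2 ^ (n + 1) := by ring

-- folding the pooling step over any list of length n is the closed-form ceiling division
lemma foldl_pool (l : List Int) (x : Int) :
    l.foldl (fun a _ => PySem.Int.floordiv (a + 2 - 1) 2) x =
      -(PySem.Int.floordiv (-x) (2 ^ l.length)) := by
  induction l generalizing x with
  | nil => simp [PySem.Int.floordiv]
  | cons h t ih =>
    rw [List.foldl_cons, ih, pool_eq_ceil, List.length_cons]
    exact ceil_ceil t.length x

lemma foldl_pool_pair (l : List Int) (x y : Int) :
    l.foldl (fun (p : Int × Int) _ =>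
        (PySem.Int.floordiv (p.1 + 2 - 1) 2, PySem.Int.floordiv (p.2 + 2 - 1) 2)) (x, y) =
      (l.foldl (fun a _ => PySem.Int.floordiv (a + 2 - 1) 2) x,
       l.foldl (fun a _ => PySem.Int.floordiv (a + 2 - 1) 2) y) := by
  induction l generalizing x y with
  | nil => rfl
  | cons h t ih => simpa using ih _ _

-- (d//s + 1 - 1) * s = (d//s) * s
lemma conv_deconv (d s p : Int) :
    (PySem.Int.floordiv d s + 1 - 1) * s + p = (PySem.Int.floordiv d s) * s + p := by
  ring_nf

-- ===== VERDICT (by name: the statement is the Claim_ definition above) =====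
theorem swap_filter_fit_spec : Claim_equal_swap_filter_fit := by
  intro H W patch_size stride n_pools _ hpre
  obtain ⟨hs, hn⟩ := hpre
  show swap_filter_fit H W patch_size stride n_pools = swap_filter_fit_alt H W patch_size stride n_pools
  unfold swap_filter_fit swap_filter_fit_alt
  simp only [foldl_pool_pair, foldl_pool, PySem.List.length_pyRange_one]
  have hlen : (n_pools - 0).toNat = n_pools.toNat := by omega
  rw [hlen]
  simp only [conv_deconv]
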